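-- pv_equiv track=rewrite | github.com/Renghe/Prep-LeetCode | Easy/1952_Three_Divisors.py | isThree
-- ===== SOURCE A (Python) =====
-- import math
--
-- def isThree(n: int) -> bool:
--     root = int(math.sqrt(n))
--     if root * root != n:
--         return False
--
--     # Check if the square root is a prime number
--     for i in range(2, int(math.sqrt(root)) + 1):
--         if root % i == 0:
--             return False
--     return root > 1
-- ===== SOURCE B (Python) =====
-- def isThree(n: int) -> bool:
--     # n has exactly three divisors iff n = p*p for its smallest factor p (then p is prime).
--     # Trial-divide: the first i >= 2 with i*i <= n and i | n is n's smallest nontrivial factor;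
--     # n has exactly three divisors exactly when that factor squared is n.
--     i = 2
--     while i * i <= n:
--         if n % i == 0:
--             return i * i == n
--         i += 1
--     return False
-- ===== Notes on version B (the rewrite author's own statement) =====
-- stated objective: simpler
-- what changed: Instead of taking a float square root, testing for a perfect square and then running a primality loop on the root, B runs one trial-division loop and returns whether the smallest nontrivial factor squared equals n.
import Mathlib
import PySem

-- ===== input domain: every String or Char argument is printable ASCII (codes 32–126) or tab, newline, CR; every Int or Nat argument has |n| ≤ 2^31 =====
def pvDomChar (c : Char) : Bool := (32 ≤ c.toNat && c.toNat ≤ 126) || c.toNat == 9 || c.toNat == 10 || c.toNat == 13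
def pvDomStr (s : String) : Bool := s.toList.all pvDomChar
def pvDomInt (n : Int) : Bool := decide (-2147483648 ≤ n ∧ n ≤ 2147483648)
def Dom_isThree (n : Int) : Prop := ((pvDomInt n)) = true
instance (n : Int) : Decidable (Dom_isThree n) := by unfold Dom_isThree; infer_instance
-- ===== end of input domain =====

-- B replaces A's float-sqrt perfect-square test plus primality loop by a single
-- trial-division loop: simpler, same exact results on 0 ≤ n (A raises on n < 0).

-- ===== PORT A =====
-- int(math.sqrt(n)) is ported as Nat.sqrt n.toNat: exact for every 0 ≤ n ≤ 2^31
-- (Pre_ ∧ Dom_), where the double sqrt is close enough to the true root that its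
-- floor equals the integer square root.
def isThree (n : Int) : Bool :=
  let root : Int := (Nat.sqrt n.toNat : Int)
  if root * root != n then false
  else if (PySem.List.pyRange 2 ((Nat.sqrt root.toNat : Int) + 1) 1).any
            (fun i => root % i == 0) then false     -- for-loop with early `return False`
  else decide (root > 1)

-- ===== PORT B =====
-- Source B's loop `i = 2; while i*i <= n: ...`, with a fuel argument only to make the
-- recursion structural (fuel m+1 always suffices to reach the first i with i*i > m).
def altLoop (m : Nat) : Nat → Nat → Bool
  | 0, _ => false
  | fuel + 1, i =>
    if i * i ≤ m then
      (if m % i = 0 then decide (i * i = m) else altLoop m fuel (i + 1))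
    else false

-- Source B only inspects n via `i*i <= n` and `n % i` with i ≥ 2, so for n < 0 the guard
-- is immediately false and it returns False, exactly as here with n.toNat = 0;
-- for n ≥ 0 the port is literal.
def isThree_alt (n : Int) : Bool := altLoop n.toNat (n.toNat + 1) 2

-- ===== PRECONDITION & SPEC =====
-- Pre_ excludes exactly the inputs on which A raises: math.sqrt raises ValueError for n < 0.
def Pre_isThree (n : Int) : Prop := 0 ≤ n
instance (n : Int) : Decidable (Pre_isThree n) := by unfold Pre_isThree; infer_instance
def pvWitness_isThree : Int := (9)

def Spec_isThree (n : Int) (out : Bool) : Prop := out = isThree_alt n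
instance (n : Int) (out : Bool) : Decidable (Spec_isThree n out) := by unfold Spec_isThree; infer_instance

-- ===== CLAIM (what is proved, stated in full; the proofs are below) =====
def Claim_equal_isThree : Prop := ∀ (n : Int), Dom_isThree n → Pre_isThree n → Spec_isThree n (isThree n)

-- ===== LEMMAS AND PROOFS =====

-- Both ports decide the same predicate: "m is the square of a prime".

lemma altLoop_iff (m : Nat) :
    ∀ d i, m + 1 - i ≤ d → 2 ≤ i → (∀ k, 2 ≤ k → k < i → ¬ k ∣ m) →
      (altLoop m d i = true ↔ ∃ p, Nat.Prime p ∧ p * p = m) := by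
  intro d
  induction d with
  | zero =>
    intro i hd hi h
    simp only [altLoop, Bool.false_eq_true, false_iff]
    rintro ⟨p, hp, hpm⟩
    have hp2 : 2 ≤ p := hp.two_le
    have hpd : p ∣ m := hpm ▸ Dvd.intro p rfl
    have hpi : i ≤ p := by
      by_contra hlt
      exact h p hp2 (by omega) hpd
    have : p ≤ p * p := Nat.le_mul_of_pos_left p (by omega)
    omega
  | succ d ih =>
    intro i hd hi h
    rw [altLoop]
    by_cases hle : i * i ≤ m
    · rw [if_pos hle]
      by_cases hmod : m % i = 0
      · have hidvd : i ∣ m := Nat.dvd_of_mod_eq_zero hmod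
        rw [if_pos hmod]
        simp only [decide_eq_true_eq]
        constructor
        · intro him
          refine ⟨i, ?_, him⟩
          rw [Nat.prime_def_lt]
          refine ⟨hi, fun k hk hkd => ?_⟩
          by_contra hk1
          have hk2 : 2 ≤ k := by
            rcases k with _ | _ | k
            · have := Nat.eq_zero_of_zero_dvd hkd; omega
            · exact absurd rfl hk1
            · omega
          exact h k hk2 (by omega) (hkd.trans hidvd)
        · rintro ⟨p, hp, hpm⟩
          have hip2 : i ∣ p ^ 2 := by rw [pow_two, hpm]; exact hidvd
          rcases (Nat.dvd_prime_pow hp).mp hip2 with ⟨k, hk2, hik⟩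
          interval_cases k
          · simp at hik; omega
          · rw [pow_one] at hik
            rw [hik]; exact hpm
          · rw [pow_two] at hik
            rw [hik, ← hpm] at hle
            nlinarith [hp.two_le]
      · rw [if_neg hmod]
        have him : ¬ i ∣ m := fun hdvd => hmod (Nat.mod_eq_zero_of_dvd hdvd)
        have hiLe : i ≤ m := le_trans (Nat.le_mul_of_pos_left i (by omega)) hle
        apply ih (i + 1) (by omega) (by omega)
        intro k hk2 hki
        rcases Nat.lt_or_ge k i with hlt | hge
        · exact h k hk2 hlt
        · have : k = i := by omega
          subst this
          exact him
    · rw [if_neg hle]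
      simp only [Bool.false_eq_true, false_iff]
      rintro ⟨p, hp, hpm⟩
      have hp2 : 2 ≤ p := hp.two_le
      have hpd : p ∣ m := hpm ▸ Dvd.intro p rfl
      have hpi : i ≤ p := by
        by_contra hlt
        exact h p hp2 (by omega) hpd
      have : i * i ≤ p * p := Nat.mul_le_mul hpi hpi
      omega

lemma isThree_alt_iff (m : Nat) :
    altLoop m (m + 1) 2 = true ↔ ∃ p, Nat.Prime p ∧ p * p = m :=
  altLoop_iff m (m + 1) 2 (by omega) (by omega) (fun k hk hlt => by omega)

lemma sqrt_of_sq {m p : Nat} (h : p * p = m) : Nat.sqrt m = p := by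
  rw [← h, ← pow_two, Nat.sqrt_eq']

lemma isThree_iff (m : Nat) :
    isThree (m : Int) = true ↔ ∃ p, Nat.Prime p ∧ p * p = m := by
  unfold isThree
  simp only [Int.toNat_natCast]
  by_cases hsq : Nat.sqrt m * Nat.sqrt m = m
  · have hsqI : ((Nat.sqrt m : Int)) * (Nat.sqrt m : Int) = (m : Int) := by exact_mod_cast hsq
    rw [if_neg (by simp [hsqI])]
    by_cases hany : (PySem.List.pyRange 2 ((Nat.sqrt (Nat.sqrt m) : Int) + 1) 1).any
        (fun i => ((Nat.sqrt m : Int)) % i == 0) = true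
    · rw [if_pos hany]
      simp only [Bool.false_eq_true, false_iff]
      rintro ⟨p, hp, hpm⟩
      have hrp : Nat.sqrt m = p := sqrt_of_sq hpm
      rw [List.any_eq_true] at hany
      obtain ⟨i, hmem, hdiv⟩ := hany
      rw [PySem.List.mem_pyRange_one] at hmem
      have hi2 : (2 : Int) ≤ i := hmem.1
      have hik : ((i.toNat : Int)) = i := Int.toNat_of_nonneg (by omega)
      have hk2 : 2 ≤ i.toNat := by omega
      have hkub : i.toNat ≤ Nat.sqrt (Nat.sqrt m) := by
        have := hmem.2; omega
      have hkd : i.toNat ∣ Nat.sqrt m := by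
        have h0 : ((Nat.sqrt m : Int)) % i = 0 := by simpa using hdiv
        have : (i.toNat : Int) ∣ (Nat.sqrt m : Int) := by
          rw [hik]; exact Int.dvd_of_emod_eq_zero h0
        exact_mod_cast this
      exact (Nat.prime_def_le_sqrt.mp (hrp ▸ hp)).2 i.toNat hk2 (hrp ▸ hkub) (hrp ▸ hkd)
    · rw [if_neg hany]
      rw [Bool.not_eq_true, List.any_eq_false] at hany
      simp only [decide_eq_true_eq]
      constructor
      · intro hr1
        refine ⟨Nat.sqrt m, ?_, hsq⟩
        rw [Nat.prime_def_le_sqrt]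
        refine ⟨by omega, fun k hk2 hkle hkd => ?_⟩
        have hmem : ((k : Int)) ∈ PySem.List.pyRange 2 ((Nat.sqrt (Nat.sqrt m) : Int) + 1) 1 := by
          rw [PySem.List.mem_pyRange_one]
          exact ⟨by exact_mod_cast hk2, by exact_mod_cast (by omega : (k : Int) < (Nat.sqrt (Nat.sqrt m) : Int) + 1)⟩
        have hne := hany _ hmem
        simp only [beq_iff_eq] at hne
        apply hne
        exact Int.emod_eq_zero_of_dvd (Int.natCast_dvd_natCast.mpr hkd)
      · rintro ⟨p, hp, hpm⟩
        have hrp : Nat.sqrt m = p := sqrt_of_sq hpm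
        have := hp.two_le
        simp only [gt_iff_lt]
        rw [hrp]
        exact_mod_cast (by omega : 1 < p)
  · rw [if_pos (by simpa using (show ((Nat.sqrt m : Int)) * (Nat.sqrt m : Int) ≠ (m : Int) by exact_mod_cast hsq))]
    simp only [Bool.false_eq_true, false_iff]
    rintro ⟨p, hp, hpm⟩
    exact hsq (by rw [sqrt_of_sq hpm, hpm])

-- ===== VERDICT (by name: the statement is the Claim_ definition above) =====
theorem isThree_spec : Claim_equal_isThree := by
  intro n _ hpre
  unfold Spec_isThree isThree_alt
  obtain ⟨m, rfl⟩ : ∃ m : Nat, n = (m : Int) := ⟨n.toNat, (Int.toNat_of_nonneg hpre).symm⟩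
  simp only [Int.toNat_natCast]
  rw [Bool.eq_iff_iff, isThree_iff, isThree_alt_iff]
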